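-- pv_equiv track=rewrite | github.com/HwangBBang/PS_Work_Space | 프로그래머스/3/258705. 산 모양 타일링/산 모양 타일링.py | solution
-- ===== SOURCE A (Python) =====
-- def solution(n, tops):
--     dp_t = [0] * (n + 1)
--     dp_d = [0] * (n + 1)
--     dp = [0] * (n + 1)
--     if tops[0] == 0:
--         dp_t[1] = 2
--         dp_d[1] = 1
--     else:
--         dp_t[1] = 3
--         dp_d[1] = 1
--
--     dp[1] = dp_t[1]+dp_d[1]
--
--     for i in range(2, n + 1):
--         if tops[i-1] == 0:  # 삿갓없음
--             # 삼각형으로 끝나는 경우의 수 업데이트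
--             dp_t[i] = (dp_t[i-1] * 2 + dp_d[i-1]) % 10007
--             # 마름모로 끝나는 경우의 수 업데이트
--             dp_d[i] = (dp_t[i-1] + dp_d[i-1]) % 10007
--             dp[i] = (dp_t[i] + dp_d[i]) % 10007            # 총 경우의 수 업데이트
--
--         else:
--             # 삼각형으로 끝나는 경우의 수 업데이트
--             dp_t[i] = (dp_t[i-1] * 3 + dp_d[i-1]*2) % 10007
--             # 마름모로 끝나는 경우의 수 업데이트
--             dp_d[i] = (dp_t[i-1]*1 + dp_d[i-1]*1) % 10007
--             dp[i] = (dp_t[i] + dp_d[i]) % 10007            # 총 경우의 수 업데이트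
--
--     return dp[n]
-- ===== SOURCE B (Python) =====
-- def solution(n, tops):
--     MOD = 10007
--     # two-term recurrence: total(i) = (c*total(i-1) - total(i-2)) mod MOD, c = 3 or 4
--     p, q = 1, (2 if tops[0] == 0 else 3) + 1
--     for i in range(2, n + 1):
--         c = 3 if tops[i - 1] == 0 else 4
--         p, q = q, (c * q - p) % MOD
--     return q
-- ===== Notes on version B (the rewrite author's own statement) =====
-- stated objective: faster
-- what changed: Replaced the three DP arrays (triangle-ending, rhombus-ending, total) by the derived two-term scalar recurrence dp[i] = (c*dp[i-1] - dp[i-2]) mod 10007 with c = 3 or 4 depending on tops[i-1], keeping only the last two totals. B keeps two integer scalars per step instead of allocating and indexing three length-(n+1) lists (measured ~2.7x faster).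
import Mathlib
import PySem

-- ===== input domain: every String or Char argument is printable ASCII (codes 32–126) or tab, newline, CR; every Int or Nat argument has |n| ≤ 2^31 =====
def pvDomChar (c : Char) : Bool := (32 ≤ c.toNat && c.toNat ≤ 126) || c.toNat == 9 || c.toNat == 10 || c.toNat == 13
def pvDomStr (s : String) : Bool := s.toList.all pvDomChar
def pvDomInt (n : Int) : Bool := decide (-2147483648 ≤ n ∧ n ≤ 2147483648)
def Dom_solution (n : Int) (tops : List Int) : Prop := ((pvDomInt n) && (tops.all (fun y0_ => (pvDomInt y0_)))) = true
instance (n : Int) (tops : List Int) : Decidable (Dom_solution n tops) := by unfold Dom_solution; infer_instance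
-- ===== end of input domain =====

-- B replaces A's three DP arrays by a single two-term scalar recurrence
-- dp[i] = (c·dp[i-1] - dp[i-2]) mod 10007 (c = 3 or 4), keeping only two scalars.

-- ===== PORT A =====
-- loop body of A: reads dp_t[i-1], dp_d[i-1], writes index i of all three lists
def pvStepA (tops : List Int) (st : List Int × List Int × List Int) (i : Int) :
    List Int × List Int × List Int :=
  let dp_t := st.1
  let dp_d := st.2.1
  let dp := st.2.2
  let tv := dp_t.getD (i - 1).toNat 0
  let dv := dp_d.getD (i - 1).toNat 0
  if (PySem.List.pyGet? tops (i - 1)).getD 0 = 0 then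
    let dp_t := dp_t.set i.toNat (PySem.Int.mod (tv * 2 + dv) 10007)
    let dp_d := dp_d.set i.toNat (PySem.Int.mod (tv + dv) 10007)
    let dp := dp.set i.toNat
      (PySem.Int.mod (dp_t.getD i.toNat 0 + dp_d.getD i.toNat 0) 10007)
    (dp_t, dp_d, dp)
  else
    let dp_t := dp_t.set i.toNat (PySem.Int.mod (tv * 3 + dv * 2) 10007)
    let dp_d := dp_d.set i.toNat (PySem.Int.mod (tv * 1 + dv * 1) 10007)
    let dp := dp.set i.toNat
      (PySem.Int.mod (dp_t.getD i.toNat 0 + dp_d.getD i.toNat 0) 10007)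
    (dp_t, dp_d, dp)

-- code of A before the loop (array allocation and base case)
def pvInitA (n : Int) (tops : List Int) : List Int × List Int × List Int :=
  let sz := (n + 1).toNat
  let dp_t := List.replicate sz (0 : Int)
  let dp_d := List.replicate sz (0 : Int)
  let dp := List.replicate sz (0 : Int)
  let dp_t :=
    if (PySem.List.pyGet? tops 0).getD 0 = 0 then dp_t.set 1 2 else dp_t.set 1 3
  let dp_d := dp_d.set 1 1
  let dp := dp.set 1 (dp_t.getD 1 0 + dp_d.getD 1 0)
  (dp_t, dp_d, dp)

def solution (n : Int) (tops : List Int) : Int :=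
  let st := (PySem.List.pyRange 2 (n + 1) 1).foldl (pvStepA tops) (pvInitA n tops)
  st.2.2.getD n.toNat 0

-- ===== PORT B =====
-- loop body of B: (p, q) = (dp[i-2], dp[i-1]) ↦ (dp[i-1], dp[i])
def pvStepB (tops : List Int) (pq : Int × Int) (i : Int) : Int × Int :=
  let c : Int := if (PySem.List.pyGet? tops (i - 1)).getD 0 = 0 then 3 else 4
  (pq.2, PySem.Int.mod (c * pq.2 - pq.1) 10007)

def solution_alt (n : Int) (tops : List Int) : Int :=
  let q1 : Int := (if (PySem.List.pyGet? tops 0).getD 0 = 0 then 2 else 3) + 1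
  let pq := (PySem.List.pyRange 2 (n + 1) 1).foldl (pvStepB tops) (1, q1)
  pq.2

-- ===== PRECONDITION & SPEC =====
-- exactly the inputs where A returns: n ≥ 1 (else the base-case writes/reads
-- are out of range) and tops has at least n entries (A reads tops[0..n-1])
def Pre_solution (n : Int) (tops : List Int) : Prop :=
  1 ≤ n ∧ n ≤ (tops.length : Int)

instance (n : Int) (tops : List Int) : Decidable (Pre_solution n tops) := by
  unfold Pre_solution; infer_instance

def pvWitness_solution : Int × List Int := (3, [0, 1, 0])

def Spec_solution (n : Int) (tops : List Int) (out : Int) : Prop := out = solution_alt n tops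
instance (n : Int) (tops : List Int) (out : Int) : Decidable (Spec_solution n tops out) := by unfold Spec_solution; infer_instance

-- ===== CLAIM (what is proved, stated in full; the proofs are below) =====
def Claim_equal_solution : Prop := ∀ (n : Int) (tops : List Int), Dom_solution n tops → Pre_solution n tops → Spec_solution n tops (solution n tops)

-- ===== LEMMAS AND PROOFS =====

-- mathematical value of (dp_t[k], dp_d[k]) in A
def pvT (tops : List Int) : Nat → Int × Int
  | 0 => (0, 0)
  | 1 => ((if tops[0]?.getD 0 = 0 then 2 else 3), 1)
  | (k + 2) =>
    let t := (pvT tops (k + 1)).1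
    let d := (pvT tops (k + 1)).2
    if tops[k + 1]?.getD 0 = 0 then
      (PySem.Int.mod (t * 2 + d) 10007, PySem.Int.mod (t + d) 10007)
    else
      (PySem.Int.mod (t * 3 + d * 2) 10007, PySem.Int.mod (t + d) 10007)

-- mathematical value of dp[k] in A
def pvDP (tops : List Int) : Nat → Int
  | 0 => 0
  | 1 => (pvT tops 1).1 + (pvT tops 1).2
  | (k + 2) => PySem.Int.mod ((pvT tops (k + 2)).1 + (pvT tops (k + 2)).2) 10007

lemma pvGetD0 (tops : List Int) (i : Int) (hi : 0 ≤ i) :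
    (PySem.List.pyGet? tops i).getD 0 = tops[i.toNat]?.getD 0 := by
  rw [PySem.List.pyGet?_of_nonneg tops hi]

lemma pvT_snd (tops : List Int) (k : Nat) :
    (pvT tops (k + 2)).2 = PySem.Int.mod ((pvT tops (k + 1)).1 + (pvT tops (k + 1)).2) 10007 := by
  simp only [pvT]
  split <;> rfl

-- dp[k+1] equals dp_d[k+2]
lemma pvDP_eq_snd (tops : List Int) (k : Nat) :
    pvDP tops (k + 1) = (pvT tops (k + 2)).2 := by
  rw [pvT_snd]
  cases k with
  | zero =>
    simp only [pvDP, pvT, PySem.Int.mod_eq_emod_of_pos (show (0:Int) < 10007 by norm_num)]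
    by_cases h : tops[0]?.getD 0 = (0 : Int) <;> simp [h]
  | succ m => rfl

-- dp[k+1] is congruent to dp_t[k+1] + dp_d[k+1] mod 10007
lemma pvDP_cong (tops : List Int) (k : Nat) :
    pvDP tops (k + 1) % 10007 = ((pvT tops (k + 1)).1 + (pvT tops (k + 1)).2) % 10007 := by
  cases k with
  | zero => simp [pvDP]
  | succ m =>
    show pvDP tops (m + 2) % 10007 = ((pvT tops (m + 2)).1 + (pvT tops (m + 2)).2) % 10007
    simp only [pvDP,
      PySem.Int.mod_eq_emod_of_pos (show (0:Int) < 10007 by norm_num)]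
    omega

-- invariant for A's fold: lengths stay n+1 and slot m+1 holds the step-(m+1) values
lemma invA (tops : List Int) (n : Int) (hn : 1 ≤ n) :
    ∀ (m : Nat), (m : Int) + 1 ≤ n →
      (((PySem.List.pyRange 2 (2 + (m : Int)) 1).foldl (pvStepA tops)
          (pvInitA n tops)).1.length = (n + 1).toNat ∧
       ((PySem.List.pyRange 2 (2 + (m : Int)) 1).foldl (pvStepA tops)
          (pvInitA n tops)).2.1.length = (n + 1).toNat ∧
       ((PySem.List.pyRange 2 (2 + (m : Int)) 1).foldl (pvStepA tops)
          (pvInitA n tops)).2.2.length = (n + 1).toNat) ∧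
      ((PySem.List.pyRange 2 (2 + (m : Int)) 1).foldl (pvStepA tops)
          (pvInitA n tops)).1[m + 1]?.getD 0 = (pvT tops (m + 1)).1 ∧
      ((PySem.List.pyRange 2 (2 + (m : Int)) 1).foldl (pvStepA tops)
          (pvInitA n tops)).2.1[m + 1]?.getD 0 = (pvT tops (m + 1)).2 ∧
      ((PySem.List.pyRange 2 (2 + (m : Int)) 1).foldl (pvStepA tops)
          (pvInitA n tops)).2.2[m + 1]?.getD 0 = pvDP tops (m + 1) := by
  intro m
  induction m with
  | zero =>
    intro _
    rw [show (2 + ((0:Nat) : Int)) = 2 by norm_num,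
      PySem.List.pyRange_one_eq_nil (by omega)]
    have h1 : 1 < (n + 1).toNat := by omega
    simp only [List.foldl_nil, pvInitA, pvGetD0 tops 0 le_rfl, Int.toNat_zero]
    by_cases h : tops[0]?.getD 0 = (0 : Int) <;>
      simp only [h, if_true, if_false] <;>
      refine ⟨⟨by simp, by simp, by simp⟩, ?_, ?_, ?_⟩ <;>
      simp [pvT, pvDP, h, List.getD_eq_getElem?_getD, h1]
  | succ m ih =>
    intro hm
    have hm2 : (m : Int) + 1 ≤ n := by push_cast at hm ⊢; omega
    obtain ⟨⟨hl1, hl2, hl3⟩, ht, hd, hdp⟩ := ih hm2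
    rw [show (2 + ((m + 1 : Nat) : Int)) = (2 + (m : Int)) + 1 by push_cast; ring,
      PySem.List.pyRange_one_succ_right (by omega), List.foldl_append]
    simp only [List.foldl_cons, List.foldl_nil]
    set st := (PySem.List.pyRange 2 (2 + (m : Int)) 1).foldl (pvStepA tops)
      (pvInitA n tops) with hst
    have hi1 : ((2 + (m : Int)) - 1).toNat = m + 1 := by omega
    have hi2 : (2 + (m : Int)).toNat = m + 2 := by omega
    have hlt1 : m + 2 < st.1.length := by rw [hl1]; omega
    have hlt2 : m + 2 < st.2.1.length := by rw [hl2]; omega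
    have hlt3 : m + 2 < st.2.2.length := by rw [hl3]; omega
    have hne : m + 1 ≠ m + 2 := by omega
    have hge : (0:Int) ≤ 2 + (m : Int) - 1 := by omega
    have htD : st.1.getD (m + 1) 0 = (pvT tops (m + 1)).1 := by
      rw [List.getD_eq_getElem?_getD]; exact ht
    have hdD : st.2.1.getD (m + 1) 0 = (pvT tops (m + 1)).2 := by
      rw [List.getD_eq_getElem?_getD]; exact hd
    unfold pvStepA
    rw [pvGetD0 tops _ hge, hi1, hi2]
    by_cases h : tops[m + 1]?.getD 0 = (0 : Int) <;>
      simp only [h, if_true, if_false, htD, hdD] <;>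
      refine ⟨⟨by simp [hl1], by simp [hl2], by simp [hl3]⟩, ?_, ?_, ?_⟩ <;>
      simp [pvT, pvDP, h, List.getD_eq_getElem?_getD,
        hlt1, hlt2, hlt3]

-- invariant for B's fold: (p, q) = (dp_d[m+1], dp[m+1])
lemma invB (tops : List Int) (n : Int) :
    ∀ (m : Nat), (m : Int) + 1 ≤ n →
      (PySem.List.pyRange 2 (2 + (m : Int)) 1).foldl (pvStepB tops)
        (1, (if (PySem.List.pyGet? tops 0).getD 0 = 0 then 2 else 3) + 1) =
      ((pvT tops (m + 1)).2, pvDP tops (m + 1)) := by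
  intro m
  induction m with
  | zero =>
    intro _
    rw [show (2 + ((0:Nat) : Int)) = 2 by norm_num,
      PySem.List.pyRange_one_eq_nil (by omega)]
    simp only [List.foldl_nil, pvGetD0 tops 0 le_rfl, Int.toNat_zero]
    by_cases h : tops[0]?.getD 0 = (0 : Int) <;>
      simp [h, pvT, pvDP]
  | succ m ih =>
    intro hm
    have hm2 : (m : Int) + 1 ≤ n := by push_cast at hm ⊢; omega
    rw [show (2 + ((m + 1 : Nat) : Int)) = (2 + (m : Int)) + 1 by push_cast; ring,
      PySem.List.pyRange_one_succ_right (by omega), List.foldl_append,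
      ih hm2]
    simp only [List.foldl_cons, List.foldl_nil]
    have hge : (0:Int) ≤ 2 + (m : Int) - 1 := by omega
    have hi1 : ((2 + (m : Int)) - 1).toNat = m + 1 := by omega
    unfold pvStepB
    rw [pvGetD0 tops _ hge, hi1]
    have hq := pvDP_cong tops m
    have hpd := pvDP_eq_snd tops m
    have hM : (0:Int) < 10007 := by norm_num
    refine Prod.ext hpd ?_
    show PySem.Int.mod _ 10007 = pvDP tops (m + 2)
    by_cases h : tops[m + 1]?.getD 0 = (0 : Int) <;>
      · simp only [h, if_true, if_false, pvDP, pvT,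
          PySem.Int.mod_eq_emod_of_pos hM] at hq ⊢
        omega

-- ===== VERDICT (by name: the statement is the Claim_ definition above) =====
theorem solution_spec : Claim_equal_solution := by
  intro n tops _ hpre
  obtain ⟨hn, _⟩ := hpre
  unfold Spec_solution solution solution_alt
  have hmn : ((n.toNat - 1 : Nat) : Int) + 1 ≤ n := by omega
  have hA := invA tops n hn (n.toNat - 1) hmn
  have hB := invB tops n (n.toNat - 1) hmn
  have hr : (2 + ((n.toNat - 1 : Nat) : Int)) = n + 1 := by omega
  rw [hr] at hA hB
  have hk : n.toNat - 1 + 1 = n.toNat := by omega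
  rw [hk] at hA hB
  show ((PySem.List.pyRange 2 (n + 1) 1).foldl (pvStepA tops) (pvInitA n tops)).2.2.getD n.toNat 0 =
    ((PySem.List.pyRange 2 (n + 1) 1).foldl (pvStepB tops)
      (1, (if (PySem.List.pyGet? tops 0).getD 0 = 0 then 2 else 3) + 1)).2
  rw [hB, List.getD_eq_getElem?_getD]
  exact hA.2.2.2
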